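-- pv_equiv track=rewrite | github.com/Lmy0217/PyTorch-Project-Framework | utils/path.py | comp_path
-- ===== SOURCE A (Python) =====
-- def comp_path(paths: dict, counts: list, indexes: list):
--     path_dict = dict()
--     for name, value in paths.items():
--         if isinstance(value, str):
--             path_dict[name] = list(value)
--             if len(path_dict[name]) < 1:
--                 raise ValueError('path is empty!')
--     for name, l in path_dict.items():
--         l_index, l_index_start, l_index_count, l_flag = -1, -1, 0, False
--         for i, d in enumerate(l):
--             if d == '?':
--                 if not l_flag:
--                     l_index, l_index_start, l_flag = l_index + 1, i, True
--                 l_index_count += 1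
--             else:
--                 if l_flag:
--                     if indexes[l_index] < 1 or indexes[l_index] > counts[l_index] or \
--                             len(str(indexes[l_index])) > l_index_count:
--                         raise ValueError('index error!')
--                     for ii, ss in enumerate(list(str(indexes[l_index]).zfill(l_index_count))):
--                         l[l_index_start + ii] = ss
--                     l_index_count, l_flag = 0, False
--         if l_flag:
--             if indexes[l_index] < 1 or indexes[l_index] > counts[l_index] or \
--                     len(str(indexes[l_index])) > l_index_count:
--                 raise ValueError('index error!')
--             for ii, ss in enumerate(list(str(indexes[l_index]).zfill(l_index_count))):
--                 l[l_index_start + ii] = ss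
--         path_dict[name] = ''.join(l)
--     return path_dict
-- ===== SOURCE B (Python) =====
-- def comp_path(paths: dict, counts: list, indexes: list):
--     path_dict = dict()
--     for name, value in paths.items():
--         if isinstance(value, str):
--             if not value:
--                 raise ValueError('path is empty!')
--             path_dict[name] = value
--     for name, value in path_dict.items():
--         out = []
--         k = 0
--         i = 0
--         n = len(value)
--         while i < n:
--             if value[i] == '?':
--                 j = i
--                 while j < n and value[j] == '?':
--                     j += 1
--                 width = j - i
--                 idx = indexes[k]
--                 if idx < 1 or idx > counts[k] or len(str(idx)) > width:
--                     raise ValueError('index error!')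
--                 out.append(str(idx).zfill(width))
--                 k += 1
--                 i = j
--             else:
--                 out.append(value[i])
--                 i += 1
--         path_dict[name] = ''.join(out)
--     return path_dict
-- ===== Notes on version B (the rewrite author's own statement) =====
-- stated objective: simpler
-- what changed: A tracks '?'-runs with l_index/l_index_start/l_index_count/l_flag state and patches the zero-filled indexes back into a mutable character list; B builds each result string directly in one forward pass that takes each maximal '?'-run, validates it, and appends str(index).zfill(width).
import Mathlib
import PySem

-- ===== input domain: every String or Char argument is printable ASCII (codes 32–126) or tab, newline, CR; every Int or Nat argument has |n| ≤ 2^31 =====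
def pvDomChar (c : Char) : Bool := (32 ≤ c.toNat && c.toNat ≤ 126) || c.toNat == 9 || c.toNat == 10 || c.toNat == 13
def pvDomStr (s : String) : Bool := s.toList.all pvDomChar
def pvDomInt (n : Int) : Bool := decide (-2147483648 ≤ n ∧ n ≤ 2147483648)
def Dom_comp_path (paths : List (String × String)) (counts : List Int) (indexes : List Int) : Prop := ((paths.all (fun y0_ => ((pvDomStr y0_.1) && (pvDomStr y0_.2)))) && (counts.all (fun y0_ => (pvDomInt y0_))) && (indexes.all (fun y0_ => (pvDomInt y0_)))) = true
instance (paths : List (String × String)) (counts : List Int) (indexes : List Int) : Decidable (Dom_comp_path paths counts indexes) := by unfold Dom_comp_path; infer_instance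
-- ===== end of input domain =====

-- B replaces A's in-place character-array surgery (run bookkeeping with l_index/l_index_start/l_flag and
-- deferred writes back into the list) by a single forward pass that splits each string into '?'-runs and
-- builds the result string directly; objective: simpler.  Equality is about the RETURN value (A mutates
-- only its private copies).  Pre_ excludes exactly the inputs where A raises (empty path string;
-- an out-of-range, non-positive, too-large or too-wide index), on which B raises identically.

-- shared helpers (both Pythons contain the same first pass and the same str(idx).zfill(width) call)
def isQ (c : Char) : Bool := c == '?'

-- first pass: path_dict[name] = value for every entry (all values are str here by the type convention);
-- the `len < 1` ValueError is outside Pre_.  (Python stores list(value); we keep the String and take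
-- .toList in the second pass, which is the same data.)
def buildDict (paths : List (String × String)) : PySem.Dict String String :=
  paths.foldl (fun d p => d.insert p.1 p.2) PySem.Dict.empty

-- str(idx).zfill(w)
def zfillInt (v : Int) (w : Nat) : List Char := PySem.Chars.zfill (PySem.Int.toChars v) (w : Int)

-- ===== PORT A =====
-- `for ii, ss in enumerate(list(str(indexes[l_index]).zfill(l_index_count))): l[l_index_start+ii] = ss`
def writeAt : List Char → Nat → List Char → List Char
  | l, _, [] => l
  | l, p, s :: ss => writeAt (l.set p s) (p + 1) ss

-- the guarded write; the `raise ValueError('index error!')` branch (and the IndexError of an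
-- out-of-range l_index, encoded by pyGet? = none) is outside Pre_, where we leave l unchanged.
def flushA (counts indexes : List Int) (l : List Char) (idx : Int) (start cnt : Nat) : List Char :=
  let v := (PySem.List.pyGet? indexes idx).getD 0
  let c := (PySem.List.pyGet? counts idx).getD 0
  if v < 1 ∨ c < v ∨ cnt < (PySem.Int.toChars v).length then l
  else writeAt l start (zfillInt v cnt)

-- `for i, d in enumerate(l)`: every write lands strictly BEFORE the read position i, so iterating the
-- original snapshot cs of l while threading the mutated l is exact.
def loopA (counts indexes : List Int) (idx : Int) (start cnt : Nat) (flag : Bool) (i : Nat)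
    (l : List Char) : List Char → List Char
  | [] => if flag then flushA counts indexes l idx start cnt else l
  | c :: rest =>
      if isQ c then
        if flag then loopA counts indexes idx start (cnt + 1) flag (i + 1) l rest
        else loopA counts indexes (idx + 1) i (cnt + 1) true (i + 1) l rest
      else
        if flag then
          loopA counts indexes idx start 0 false (i + 1) (flushA counts indexes l idx start cnt) rest
        else loopA counts indexes idx start cnt flag (i + 1) l rest

def procA (counts indexes : List Int) (l : List Char) : List Char :=
  loopA counts indexes (-1) 0 0 false 0 l l

def comp_path (paths : List (String × String)) (counts : List Int) (indexes : List Int) :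
    List (String × String) :=
  let pd := buildDict paths
  -- `for name, l in path_dict.items(): … ; path_dict[name] = ''.join(l)` — each key overwritten in place
  (pd.items.foldl (fun d p => d.insert p.1 (String.ofList (procA counts indexes p.2.toList))) pd).items

-- ===== PORT B =====
-- one forward pass: copy plain characters, replace each maximal '?'-run (the inner while j loop =
-- takeWhile/dropWhile) by the zero-filled index; the ValueError branch is outside Pre_ and skipped.
def goB (counts indexes : List Int) (k : Nat) : List Char → List Char
  | [] => []
  | c :: rest =>
      if isQ c then
        let width := (rest.takeWhile isQ).length + 1
        zfillInt (PySem.List.pyGetD indexes (k : Int) 0) width ++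
          goB counts indexes (k + 1) (rest.dropWhile isQ)
      else c :: goB counts indexes k rest
  termination_by cs => cs.length
  decreasing_by
  · simp only [List.length_cons]
    have := List.length_dropWhile_le isQ rest; omega
  · simp

def procB (counts indexes : List Int) (l : List Char) : List Char :=
  goB counts indexes 0 l

def comp_path_alt (paths : List (String × String)) (counts : List Int) (indexes : List Int) :
    List (String × String) :=
  let pd := buildDict paths
  (pd.items.foldl (fun d p => d.insert p.1 (String.ofList (procB counts indexes p.2.toList))) pd).items

-- ===== PRECONDITION & SPEC =====
-- closed-form run description: position i starts a maximal '?'-run iff it holds a '?' whose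
-- predecessor is absent or not a '?'; the k-th run width is read off with takeWhile from its start
def runStart (l : List Char) (i : Nat) : Bool :=
  isQ (l.getD i ' ') && (i == 0 || !(isQ (l.getD (i - 1) ' ')))

def runWidthsC (l : List Char) : List Nat :=
  ((List.range l.length).filter (runStart l)).map (fun i => ((l.drop i).takeWhile isQ).length)

def okRun (counts indexes : List Int) (k w : Nat) : Bool :=
  decide (k < indexes.length) && decide (k < counts.length) &&
  decide (1 ≤ indexes.getD k 0) && decide (indexes.getD k 0 ≤ counts.getD k 0) &&
  decide ((PySem.Int.toChars (indexes.getD k 0)).length ≤ w)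

-- Pre_ = exactly the inputs on which the Python A returns normally: no empty path string
-- (ValueError 'path is empty!') and every '?'-run of every stored path validates
-- (ValueError 'index error!' / IndexError on indexes[k] or counts[k]).
def Pre_comp_path (paths : List (String × String)) (counts : List Int) (indexes : List Int) : Prop :=
  (∀ p ∈ paths, p.2 ≠ "") ∧
  ∀ p ∈ (buildDict paths).items, ∀ k, k < (runWidthsC p.2.toList).length →
    okRun counts indexes k ((runWidthsC p.2.toList).getD k 0) = true
instance (paths : List (String × String)) (counts : List Int) (indexes : List Int) : Decidable (Pre_comp_path paths counts indexes) := by unfold Pre_comp_path; infer_instance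

def pvWitness_comp_path : (List (String × String)) × List Int × List Int :=
  ([("model", "run?/ep??.pt"), ("log", "log?.txt")], [9, 99], [3, 42])

def Spec_comp_path (paths : List (String × String)) (counts : List Int) (indexes : List Int) (out : List (String × String)) : Prop := out = comp_path_alt paths counts indexes
instance (paths : List (String × String)) (counts : List Int) (indexes : List Int) (out : List (String × String)) : Decidable (Spec_comp_path paths counts indexes out) := by unfold Spec_comp_path; infer_instance

-- ===== CLAIM (what is proved, stated in full; the proofs are below) =====
def Claim_equal_comp_path : Prop := ∀ (paths : List (String × String)) (counts : List Int) (indexes : List Int), Dom_comp_path paths counts indexes → Pre_comp_path paths counts indexes → Spec_comp_path paths counts indexes (comp_path paths counts indexes)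

-- ===== LEMMAS AND PROOFS =====

lemma length_zfillInt (v : Int) (w : Nat) (h : (PySem.Int.toChars v).length ≤ w) :
    (zfillInt v w).length = w := by
  simp [zfillInt, PySem.Chars.length_zfill]; omega

lemma writeAt_spec : ∀ (zf mid done rest : List Char), mid.length = zf.length →
    writeAt (done ++ (mid ++ rest)) done.length zf = done ++ (zf ++ rest) := by
  intro zf
  induction zf with
  | nil => intro mid done rest h; simp at h; simp [h, writeAt]
  | cons s ss ih =>
      intro mid done rest h
      match mid with
      | [] => simp at h
      | m :: ms =>
          simp only [writeAt, List.cons_append, List.set_append, lt_irrefl, if_false,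
            Nat.sub_self, List.set_cons_zero]
          have : done ++ s :: (ms ++ rest) = (done ++ [s]) ++ (ms ++ rest) := by simp
          rw [this]
          have hlen : done.length + 1 = (done ++ [s]).length := by simp
          rw [hlen, ih ms (done ++ [s]) rest (by simpa using h)]
          simp

-- proof-side helpers: the run widths / validity in the recursive form the loop proofs use
def runWidths : List Char → List Nat
  | [] => []
  | c :: rest =>
      if isQ c then ((rest.takeWhile isQ).length + 1) :: runWidths (rest.dropWhile isQ)
      else runWidths rest
  termination_by cs => cs.length
  decreasing_by
  · simp only [List.length_cons]
    have := List.length_dropWhile_le isQ rest; omega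
  · simp

def validFrom (counts indexes : List Int) : Nat → List Nat → Bool
  | _, [] => true
  | k, w :: ws => okRun counts indexes k w && validFrom counts indexes (k + 1) ws

lemma validFrom_of_forall (counts indexes : List Int) :
    ∀ (ws : List Nat) (j : Nat),
      (∀ k, k < ws.length → okRun counts indexes (j + k) (ws.getD k 0) = true) →
      validFrom counts indexes j ws = true := by
  intro ws
  induction ws with
  | nil => intro j _; rfl
  | cons w ws ih =>
      intro j h
      have h0 := h 0 (by simp)
      simp only [List.getD_cons_zero, Nat.add_zero] at h0
      have ht : validFrom counts indexes (j + 1) ws = true := by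
        apply ih
        intro k hk
        have := h (k + 1) (by simpa using Nat.succ_lt_succ hk)
        simpa [Nat.add_comm, Nat.add_assoc, Nat.add_left_comm] using this
      simp [validFrom, h0, ht]

lemma runStart_zero (c : Char) (l : List Char) : runStart (c :: l) 0 = isQ c := by
  simp [runStart]

lemma runStart_one (c : Char) (l : List Char) :
    runStart (c :: l) 1 = (isQ (l.getD 0 ' ') && !(isQ c)) := by
  simp [runStart]

lemma runStart_succ_succ (c : Char) (l : List Char) (i : Nat) :
    runStart (c :: l) (i + 2) = runStart l (i + 1) := by
  simp [runStart]

-- the closed-form run widths satisfy the recursive equations (joint strong induction);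
-- the second component handles a list whose possible initial run has already been consumed
lemma runWidthsC_bridge : ∀ (n : Nat) (l : List Char), l.length ≤ n →
    (runWidthsC l = runWidths l) ∧
    (((List.range l.length).filter (fun i => decide (i ≠ 0) && runStart l i)).map
        (fun i => ((l.drop i).takeWhile isQ).length) = runWidths (l.dropWhile isQ)) := by
  intro n
  induction n with
  | zero =>
      intro l hl
      have : l = [] := List.eq_nil_of_length_eq_zero (Nat.le_zero.mp hl)
      subst this
      constructor <;> simp [runWidthsC, runWidths]
  | succ n ih =>
      intro l hl
      match l with
      | [] => exact ih [] (by simp)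
      | c :: rest =>
          have hrest : rest.length ≤ n := by simpa using hl
          have hrange : List.range (c :: rest).length
              = 0 :: (List.range rest.length).map Nat.succ := by
            simp [List.range_succ_eq_map]
          constructor
          · -- runWidthsC (c :: rest) = runWidths (c :: rest)
            by_cases hq : isQ c
            · rw [runWidthsC, hrange]
              rw [List.filter_cons_of_pos (by simpa [runStart_zero] using hq)]
              rw [List.filter_map, List.map_cons, List.map_map]
              have hf : (List.range rest.length).filter (runStart (c :: rest) ∘ Nat.succ)
                  = (List.range rest.length).filter (fun i => decide (i ≠ 0) && runStart rest i) := by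
                apply List.filter_congr
                intro i _
                match i with
                | 0 => simp [Function.comp, runStart_one, hq]
                | j + 1 => simp [Function.comp, runStart_succ_succ]
              rw [hf]
              have hmap : ∀ s : List Nat,
                  s.map ((fun i => (((c :: rest).drop i).takeWhile isQ).length) ∘ Nat.succ)
                    = s.map (fun i => ((rest.drop i).takeWhile isQ).length) := by
                intro s; apply List.map_congr_left; intro i _; simp
              rw [hmap]
              rw [(ih rest hrest).2]
              rw [runWidths, if_pos hq]
              simp [List.takeWhile_cons, hq, runWidthsC]
            · rw [runWidthsC, hrange]
              rw [List.filter_cons_of_neg (by simp [runStart_zero, hq])]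
              rw [List.filter_map, List.map_map]
              have hf : (List.range rest.length).filter (runStart (c :: rest) ∘ Nat.succ)
                  = (List.range rest.length).filter (runStart rest) := by
                apply List.filter_congr
                intro i _
                match i with
                | 0 => simp [Function.comp, runStart, hq]
                | j + 1 => simp [Function.comp, runStart_succ_succ]
              rw [hf]
              have hmap : ∀ s : List Nat,
                  s.map ((fun i => (((c :: rest).drop i).takeWhile isQ).length) ∘ Nat.succ)
                    = s.map (fun i => ((rest.drop i).takeWhile isQ).length) := by
                intro s; apply List.map_congr_left; intro i _; simp
              rw [hmap]
              have h1 := (ih rest hrest).1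
              rw [runWidthsC] at h1
              have e : runWidths (c :: rest) = runWidths rest := by
                rw [runWidths, if_neg hq]
              rw [h1, e]
          · -- the initial-run-consumed form
            rw [hrange]
            rw [List.filter_cons_of_neg (by simp)]
            rw [List.filter_map, List.map_map]
            by_cases hq : isQ c
            · have hf : (List.range rest.length).filter
                    ((fun i => decide (i ≠ 0) && runStart (c :: rest) i) ∘ Nat.succ)
                  = (List.range rest.length).filter (fun i => decide (i ≠ 0) && runStart rest i) := by
                apply List.filter_congr
                intro i _
                match i with
                | 0 => simp [Function.comp, runStart_one, hq]
                | j + 1 => simp [Function.comp, runStart_succ_succ]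
              rw [hf]
              have hmap : ∀ s : List Nat,
                  s.map ((fun i => (((c :: rest).drop i).takeWhile isQ).length) ∘ Nat.succ)
                    = s.map (fun i => ((rest.drop i).takeWhile isQ).length) := by
                intro s; apply List.map_congr_left; intro i _; simp
              rw [hmap]
              rw [(ih rest hrest).2]
              simp [List.dropWhile_cons, hq]
            · have hf : (List.range rest.length).filter
                    ((fun i => decide (i ≠ 0) && runStart (c :: rest) i) ∘ Nat.succ)
                  = (List.range rest.length).filter (runStart rest) := by
                apply List.filter_congr
                intro i _
                match i with
                | 0 => simp [Function.comp, runStart, hq]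
                | j + 1 => simp [Function.comp, runStart_succ_succ]
              rw [hf]
              have hmap : ∀ s : List Nat,
                  s.map ((fun i => (((c :: rest).drop i).takeWhile isQ).length) ∘ Nat.succ)
                    = s.map (fun i => ((rest.drop i).takeWhile isQ).length) := by
                intro s; apply List.map_congr_left; intro i _; simp
              rw [hmap]
              have h1 := (ih rest hrest).1
              rw [runWidthsC] at h1
              have e : runWidths (c :: rest) = runWidths rest := by
                rw [runWidths, if_neg hq]
              rw [h1, List.dropWhile_cons, if_neg hq, e]

lemma valid_of_pre (counts indexes : List Int) (l : List Char)
    (h : ∀ k, k < (runWidthsC l).length →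
        okRun counts indexes k ((runWidthsC l).getD k 0) = true) :
    validFrom counts indexes 0 (runWidths l) = true := by
  have hb := (runWidthsC_bridge l.length l le_rfl).1
  rw [← hb]
  apply validFrom_of_forall
  intro k hk
  simpa using h k hk

lemma flushA_eq (counts indexes : List Int) (l : List Char) (k start cnt : Nat)
    (_hi : k < indexes.length) (_hc : k < counts.length)
    (h1 : 1 ≤ indexes.getD k 0) (h2 : indexes.getD k 0 ≤ counts.getD k 0)
    (h3 : (PySem.Int.toChars (indexes.getD k 0)).length ≤ cnt) :
    flushA counts indexes l (k : Int) start cnt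
      = writeAt l start (zfillInt (indexes.getD k 0) cnt) := by
  have hidx : (PySem.List.pyGet? indexes (k : Int)).getD 0 = indexes.getD k 0 := by
    rw [← PySem.List.pyGetD_natCast indexes k 0]; rfl
  have hcnt' : (PySem.List.pyGet? counts (k : Int)).getD 0 = counts.getD k 0 := by
    rw [← PySem.List.pyGetD_natCast counts k 0]; rfl
  simp only [flushA, hidx, hcnt']
  rw [if_neg (by omega)]

lemma main_loop (counts indexes : List Int) : ∀ (n : Nat) (cs : List Char), cs.length ≤ n →
    ((∀ (done : List Char) (k s0 : Nat),
        validFrom counts indexes k (runWidths cs) = true →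
        loopA counts indexes ((k : Int) - 1) s0 0 false done.length (done ++ cs) cs
          = done ++ goB counts indexes k cs)
     ∧
     (∀ (done : List Char) (k q : Nat),
        okRun counts indexes k (q + (cs.takeWhile isQ).length) = true →
        validFrom counts indexes (k + 1) (runWidths (cs.dropWhile isQ)) = true →
        loopA counts indexes (k : Int) done.length q true (done.length + q)
            (done ++ (List.replicate q '?' ++ cs)) cs
          = done ++ (zfillInt (indexes.getD k 0) (q + (cs.takeWhile isQ).length) ++
              goB counts indexes (k + 1) (cs.dropWhile isQ)))) := by
  intro n
  induction n with
  | zero =>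
      intro cs hcs
      have : cs = [] := List.eq_nil_of_length_eq_zero (Nat.le_zero.mp hcs)
      subst this
      constructor
      · intro done k s0 _; simp [loopA, goB]
      · intro done k q hok _
        simp only [List.takeWhile_nil, List.length_nil, Nat.add_zero] at hok ⊢
        simp only [okRun, Bool.and_eq_true, decide_eq_true_eq] at hok
        obtain ⟨⟨⟨⟨hi, hc⟩, h1⟩, h2⟩, h3⟩ := hok
        simp only [loopA]
        rw [flushA_eq counts indexes _ k _ _ hi hc h1 h2 h3]
        rw [writeAt_spec (zfillInt (indexes.getD k 0) q) (List.replicate q '?') done []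
          (by rw [length_zfillInt _ _ h3, List.length_replicate])]
        simp [goB]
  | succ n ih =>
      intro cs hcs
      match cs with
      | [] => exact ih [] (by simp)
      | c :: rest =>
          have hrest : rest.length ≤ n := by simpa using hcs
          constructor
          · -- NOFLAG state (no pending run)
            intro done k s0 hval
            by_cases hq : isQ c
            · -- a '?': a new run starts
              simp only [loopA, if_pos hq, if_neg (Bool.false_ne_true)]
              have hcast : (k : Int) - 1 + 1 = (k : Int) := by ring
              rw [hcast]
              have hshape : done ++ c :: rest = done ++ (List.replicate 1 '?' ++ rest) := by
                have : c = '?' := by simpa [isQ] using hq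
                simp [this]
              rw [hshape]
              rw [runWidths, if_pos hq] at hval
              simp only [validFrom, Bool.and_eq_true] at hval
              have h1 : okRun counts indexes k (1 + (rest.takeWhile isQ).length) = true := by
                have := hval.1; rwa [Nat.add_comm] at this
              rw [(ih rest hrest).2 done k 1 h1 hval.2]
              rw [goB]
              rw [if_pos hq, PySem.List.pyGetD_natCast, Nat.add_comm 1]
            · -- a plain character
              simp only [loopA, if_neg hq, if_neg (Bool.false_ne_true)]
              have hshape : done ++ c :: rest = (done ++ [c]) ++ rest := by simp
              have hlen : done.length + 1 = (done ++ [c]).length := by simp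
              rw [hshape, hlen]
              rw [runWidths, if_neg hq] at hval
              rw [(ih rest hrest).1 (done ++ [c]) k s0 hval]
              rw [goB]
              rw [if_neg hq]
              simp
          · -- INFLAG state (inside a pending run of width q ending just before cs)
            intro done k q hok hval
            have htw : (c :: rest).takeWhile isQ
                = if isQ c then c :: rest.takeWhile isQ else [] := List.takeWhile_cons
            have hdw : (c :: rest).dropWhile isQ
                = if isQ c then rest.dropWhile isQ else c :: rest := List.dropWhile_cons
            by_cases hq : isQ c
            · -- the run continues
              simp only [loopA, if_pos hq]
              have hshape : done ++ (List.replicate q '?' ++ c :: rest)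
                  = done ++ (List.replicate (q + 1) '?' ++ rest) := by
                have hc : c = '?' := by simpa [isQ] using hq
                simp [hc, List.replicate_succ', List.append_assoc]
              rw [hshape]
              rw [htw, if_pos hq] at hok
              rw [hdw, if_pos hq] at hval
              have hok' : okRun counts indexes k ((q + 1) + (rest.takeWhile isQ).length) = true := by
                have harg : (q + 1) + (rest.takeWhile isQ).length
                    = q + (c :: rest.takeWhile isQ).length := by
                  simp only [List.length_cons]; omega
                rwa [harg]
              have harith : done.length + q + 1 = done.length + (q + 1) := by omega
              rw [harith]
              rw [(ih rest hrest).2 done k (q + 1) hok' hval]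
              rw [htw, if_pos hq, hdw, if_pos hq]
              have harg : q + (c :: rest.takeWhile isQ).length
                  = (q + 1) + (rest.takeWhile isQ).length := by
                simp only [List.length_cons]; omega
              rw [harg]
              simp
            · -- the run ends here: flush the zero-filled index, continue without flag
              simp only [loopA, if_neg hq]
              rw [htw, if_neg hq] at hok
              simp only [List.length_nil, Nat.add_zero] at hok
              simp only [okRun, Bool.and_eq_true, decide_eq_true_eq] at hok
              obtain ⟨⟨⟨⟨hi, hc2⟩, h1⟩, h2⟩, h3⟩ := hok
              rw [flushA_eq counts indexes _ k _ _ hi hc2 h1 h2 h3]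
              rw [writeAt_spec (zfillInt (indexes.getD k 0) q) (List.replicate q '?') done
                (c :: rest) (by rw [length_zfillInt _ _ h3, List.length_replicate])]
              have hzq : (zfillInt (indexes.getD k 0) q).length = q := length_zfillInt _ _ h3
              have hshape : done ++ (zfillInt (indexes.getD k 0) q ++ c :: rest)
                  = (done ++ zfillInt (indexes.getD k 0) q ++ [c]) ++ rest := by simp
              rw [hshape]
              rw [hdw, if_neg hq] at hval
              rw [runWidths, if_neg hq] at hval
              have hlen : done.length + q + 1
                  = (done ++ zfillInt (indexes.getD k 0) q ++ [c]).length := by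
                simp only [List.length_append, List.length_cons, List.length_nil, hzq]
              have hcast : (k : Int) = ((k + 1 : Nat) : Int) - 1 := by push_cast; ring
              rw [hlen, hcast]
              rw [(ih rest hrest).1 (done ++ zfillInt (indexes.getD k 0) q ++ [c]) (k + 1)
                done.length hval]
              rw [htw, if_neg hq, hdw, if_neg hq]
              rw [goB]
              rw [if_neg hq]
              simp

lemma proc_eq (counts indexes : List Int) (l : List Char)
    (h : validFrom counts indexes 0 (runWidths l) = true) :
    procA counts indexes l = procB counts indexes l := by
  have := (main_loop counts indexes l.length l le_rfl).1 [] 0 0 h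
  simpa [procA, procB] using this

-- ===== VERDICT (by name: the statement is the Claim_ definition above) =====
theorem comp_path_spec : Claim_equal_comp_path := by
  intro paths counts indexes _ hpre
  unfold Spec_comp_path
  simp only [comp_path, comp_path_alt]
  congr 1
  apply PySem.List.foldl_congr_mem
  intro d p hp
  rw [proc_eq counts indexes p.2.toList (valid_of_pre counts indexes p.2.toList (hpre.2 p hp))]
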